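-- pv_equiv track=rewrite | github.com/eunhee-dev/problem-solving | 0x0d_simulation/15683/solve_draft.py | mark_left
-- ===== SOURCE A (Python) =====
-- import copy
--
-- def mark_left(board: list[list[str]], x: int, y: int) -> list[list[str]]:
--     checked_board = copy.deepcopy(board)
--     ny = y
--     while ny >= 0 and checked_board[x][ny] != "6":
--         if checked_board[x][ny] == "0":
--             checked_board[x][ny] = "#"
--         ny -= 1
--     return checked_board
-- ===== SOURCE B (Python) =====
-- import copy
--
-- def mark_left(board: list[list[str]], x: int, y: int) -> list[list[str]]:
--     out = copy.deepcopy(board)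
--     if y < 0:
--         return out
--     row = out[x]
--     boundary = -1
--     for i in range(y, -1, -1):
--         if row[i] == "6":
--             boundary = i
--             break
--     for i in range(boundary + 1, y + 1):
--         if row[i] == "0":
--             row[i] = "#"
--     return out
-- ===== Notes on version B (the rewrite author's own statement) =====
-- stated objective: alternative
-- what changed: B splits A's single backward while-loop (which tests and marks at once) into two separate passes: a boundary scan that finds the nearest wall '6' at or left of y, then an independent forward marking loop over the cells right of that boundary.
import Mathlib
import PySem

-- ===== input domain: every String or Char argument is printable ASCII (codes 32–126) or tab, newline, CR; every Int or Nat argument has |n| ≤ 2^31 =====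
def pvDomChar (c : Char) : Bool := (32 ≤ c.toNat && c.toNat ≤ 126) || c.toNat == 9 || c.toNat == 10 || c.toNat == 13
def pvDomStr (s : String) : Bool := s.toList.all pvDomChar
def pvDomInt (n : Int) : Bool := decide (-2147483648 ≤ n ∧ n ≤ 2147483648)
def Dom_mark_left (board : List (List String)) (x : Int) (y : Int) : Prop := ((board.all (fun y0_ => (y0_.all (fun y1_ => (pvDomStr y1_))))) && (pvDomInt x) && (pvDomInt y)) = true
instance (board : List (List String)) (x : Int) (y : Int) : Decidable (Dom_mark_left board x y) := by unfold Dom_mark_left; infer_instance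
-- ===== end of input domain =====

-- B replaces A's single backward test-and-mark while-loop by two separate passes
-- (find the wall boundary, then mark forward); same cost, different decomposition.

-- ===== PORT A =====
-- the while-loop of A: reads the board afresh each iteration, writes '#' over '0', stops at '6' or ny < 0
def markAloop (bd : List (List String)) (x : Int) (ny : Int) : List (List String) :=
  if _h : 0 ≤ ny then
    match PySem.List.pyGet? bd x with
    | none => bd  -- IndexError in Python; unreachable under Pre_
    | some row =>
      match PySem.List.pyGet? row ny with
      | none => bd  -- IndexError in Python; unreachable under Pre_
      | some c =>
        if c = "6" then bd
        else markAloop (if c = "0" then PySem.List.pySetD bd x (PySem.List.pySetD row ny "#") else bd) x (ny - 1)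
  else bd
termination_by (ny + 1).toNat
decreasing_by omega

def mark_left (board : List (List String)) (x : Int) (y : Int) : List (List String) :=
  markAloop board x y

-- ===== PORT B =====
-- B's first pass: for i in range(y, -1, -1): if row[i] == "6": boundary = i; break   (boundary starts at -1)
def findWall (row : List String) (i : Int) : Int :=
  if _h : 0 ≤ i then
    match PySem.List.pyGet? row i with
    | none => -1  -- IndexError in Python; unreachable under Pre_
    | some c => if c = "6" then i else findWall row (i - 1)
  else -1
termination_by (i + 1).toNat
decreasing_by omega

-- B's second pass: for i in range(lo, hi): if row[i] == "0": row[i] = "#"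
def markStep (r : List String) (i : Int) : List String :=
  if PySem.List.pyGet? r i = some "0" then PySem.List.pySetD r i "#" else r

def markCells (row : List String) (lo hi : Int) : List String :=
  (PySem.List.pyRange lo hi 1).foldl markStep row

def mark_left_alt (board : List (List String)) (x : Int) (y : Int) : List (List String) :=
  if y < 0 then board
  else
    match PySem.List.pyGet? board x with
    | none => board  -- IndexError in Python; unreachable under Pre_
    | some row => PySem.List.pySetD board x (markCells row (findWall row y + 1) (y + 1))

-- ===== PRECONDITION & SPEC =====
-- Pre_ excludes exactly the inputs where Python A raises IndexError: y ≥ 0 with x out of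
-- (negative-wrapping) range of the board, or y beyond the end of row board[x].
def Pre_mark_left (board : List (List String)) (x : Int) (y : Int) : Prop :=
  y < 0 ∨ (PySem.Raise.InRange board.length x ∧
           y < (((PySem.List.pyGet? board x).getD []).length : Int))
instance (board : List (List String)) (x : Int) (y : Int) : Decidable (Pre_mark_left board x y) := by
  unfold Pre_mark_left; infer_instance

def pvWitness_mark_left : List (List String) × Int × Int := ([["0", "6", "0", "1"]], 0, 2)

def Spec_mark_left (board : List (List String)) (x : Int) (y : Int) (out : List (List String)) : Prop := out = mark_left_alt board x y
instance (board : List (List String)) (x : Int) (y : Int) (out : List (List String)) : Decidable (Spec_mark_left board x y out) := by unfold Spec_mark_left; infer_instance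

-- ===== CLAIM (what is proved, stated in full; the proofs are below) =====
def Claim_equal_mark_left : Prop := ∀ (board : List (List String)) (x : Int) (y : Int), Dom_mark_left board x y → Pre_mark_left board x y → Spec_mark_left board x y (mark_left board x y)

-- ===== LEMMAS AND PROOFS =====

-- row-level version of A's loop (the board is only ever touched at row x)
def rowA (row : List String) (ny : Int) : List String :=
  if _h : 0 ≤ ny then
    match PySem.List.pyGet? row ny with
    | none => row
    | some c => if c = "6" then row else rowA (if c = "0" then PySem.List.pySetD row ny "#" else row) (ny - 1)
  else row
termination_by (ny + 1).toNat
decreasing_by omega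

theorem pyGet?_of_pyIdx {α : Type} (xs : List α) (x : Int) (j : Nat)
    (h : PySem.List.pyIdx? xs.length x = some j) : PySem.List.pyGet? xs x = xs[j]? := by
  simp [PySem.List.pyGet?, h]

theorem pySetD_of_pyIdx {α : Type} (xs : List α) (x : Int) (j : Nat) (v : α)
    (h : PySem.List.pyIdx? xs.length x = some j) : PySem.List.pySetD xs x v = xs.set j v := by
  simp [PySem.List.pySetD, PySem.List.pySet?, h]

theorem pyIdx_of_inRange (n : Nat) (x : Int) (h : PySem.Raise.InRange n x) :
    ∃ j, PySem.List.pyIdx? n x = some j ∧ j < n := by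
  obtain ⟨h1, h2⟩ := h
  unfold PySem.List.pyIdx?
  by_cases ha : 0 ≤ x
  · rw [if_pos ha, if_pos (by omega)]; exact ⟨x.toNat, rfl, by omega⟩
  · rw [if_neg ha, if_pos (by omega)]; exact ⟨n - (-x).toNat, rfl, by omega⟩

-- A's board loop is the row loop applied at row j
theorem markAloop_eq_set (k : Nat) : ∀ (bd : List (List String)) (x : Int) (j : Nat) (row : List String),
    PySem.List.pyIdx? bd.length x = some j → j < bd.length → bd[j]? = some row →
    (k : Int) < row.length → markAloop bd x (k : Int) = bd.set j (rowA row (k : Int)) := by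
  induction k with
  | zero =>
    intro bd x j row hidx hj hrow hk
    have hg2 : PySem.List.pyGet? bd x = some row := (pyGet?_of_pyIdx bd x j hidx).trans hrow
    have h0 : 0 < row.length := by exact_mod_cast hk
    have hr : PySem.List.pyGet? row ((0:Nat) : Int) = some row[0] := by
      rw [PySem.List.pyGet?_of_nonneg row (Int.natCast_nonneg 0)]
      simp [List.getElem?_eq_getElem h0]
    have hjrow : bd[j] = row := by
      have := List.getElem?_eq_getElem hj
      rw [hrow] at this; exact (Option.some.injEq _ _).mp this.symm
    rw [markAloop, rowA]
    rw [dif_pos (Int.natCast_nonneg 0), dif_pos (Int.natCast_nonneg 0)]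
    simp only [hg2, hr]
    by_cases h6 : row[0] = "6"
    · rw [if_pos h6, if_pos h6]
      rw [← hjrow, List.set_getElem_self]
    · rw [if_neg h6, if_neg h6]
      rw [markAloop, rowA]
      rw [dif_neg (by omega : ¬ (0:Int) ≤ ((0:Nat):Int) - 1), dif_neg (by omega : ¬ (0:Int) ≤ ((0:Nat):Int) - 1)]
      by_cases h0c : row[0] = "0"
      · rw [if_pos h0c, if_pos h0c]
        rw [pySetD_of_pyIdx bd x j _ hidx]
      · rw [if_neg h0c, if_neg h0c, ← hjrow, List.set_getElem_self]
  | succ n ih =>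
    intro bd x j row hidx hj hrow hk
    have hg2 : PySem.List.pyGet? bd x = some row := (pyGet?_of_pyIdx bd x j hidx).trans hrow
    have hlen : n + 1 < row.length := by exact_mod_cast hk
    have hr : PySem.List.pyGet? row ((n+1 : Nat) : Int) = some row[n+1] := by
      rw [PySem.List.pyGet?_of_nonneg row (by positivity)]
      simp [List.getElem?_eq_getElem hlen]
    have hjrow : bd[j] = row := by
      have := List.getElem?_eq_getElem hj
      rw [hrow] at this; exact (Option.some.injEq _ _).mp this.symm
    have hcast : ((n+1 : Nat) : Int) - 1 = (n : Int) := by push_cast; ring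
    rw [markAloop, rowA]
    rw [dif_pos (Int.natCast_nonneg (n+1)), dif_pos (Int.natCast_nonneg (n+1))]
    simp only [hg2, hr]
    by_cases h6 : row[n+1] = "6"
    · rw [if_pos h6, if_pos h6]
      rw [← hjrow, List.set_getElem_self]
    · rw [if_neg h6, if_neg h6, hcast]
      by_cases h0c : row[n+1] = "0"
      · rw [if_pos h0c, if_pos h0c]
        have hsetrow : PySem.List.pySetD row ((n+1 : Nat) : Int) "#" = row.set (n+1) "#" := by
          rw [PySem.List.pySetD_of_nonneg row _ (by positivity)]; simp
        rw [hsetrow, pySetD_of_pyIdx bd x j _ hidx]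
        have h1 : PySem.List.pyIdx? (bd.set j (row.set (n+1) "#")).length x = some j := by
          rw [List.length_set]; exact hidx
        have h2 : j < (bd.set j (row.set (n+1) "#")).length := by rw [List.length_set]; exact hj
        have h3 : (bd.set j (row.set (n+1) "#"))[j]? = some (row.set (n+1) "#") :=
          List.getElem?_set_self hj
        have h4 : (n : Int) < (row.set (n+1) "#").length := by
          rw [List.length_set]; exact_mod_cast (by omega : n < row.length)
        rw [ih _ x j _ h1 h2 h3 h4, List.set_set]
      · rw [if_neg h0c, if_neg h0c]
        exact ih bd x j row hidx hj hrow (by exact_mod_cast (by omega : n < row.length))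

-- boundary bounds
theorem findWall_bounds (k : Nat) (row : List String) : -1 ≤ findWall row (k : Int) ∧ findWall row (k : Int) ≤ (k : Int) := by
  induction k generalizing row with
  | zero =>
    rw [findWall, dif_pos (Int.natCast_nonneg 0)]
    cases hc : PySem.List.pyGet? row ((0:Nat) : Int) with
    | none => dsimp only; norm_num
    | some c =>
      dsimp only
      by_cases h6 : c = "6"
      · rw [if_pos h6]; norm_num
      · rw [if_neg h6, findWall, dif_neg (by norm_num : ¬ (0:Int) ≤ ((0:Nat):Int) - 1)]; norm_num
  | succ n ih =>
    rw [findWall, dif_pos (Int.natCast_nonneg (n+1))]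
    cases hc : PySem.List.pyGet? row ((n+1:Nat) : Int) with
    | none => dsimp only; constructor <;> omega
    | some c =>
      dsimp only
      by_cases h6 : c = "6"
      · rw [if_pos h6]; constructor <;> omega
      · rw [if_neg h6]
        have hcast : ((n+1 : Nat) : Int) - 1 = (n : Int) := by push_cast; ring
        rw [hcast]
        have := ih row
        constructor <;> omega

theorem findWall_neg (r : List String) (i : Int) (h : i < 0) : findWall r i = -1 := by
  rw [findWall, dif_neg (by omega)]

-- the boundary scan never looks at indices above its start
theorem findWall_set_high (k : Nat) (row : List String) (m : Nat) (v : String) (hm : k < m) :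
    findWall (row.set m v) (k : Int) = findWall row (k : Int) := by
  induction k generalizing row with
  | zero =>
    have hg : PySem.List.pyGet? (row.set m v) ((0:Nat):Int) = PySem.List.pyGet? row ((0:Nat):Int) := by
      rw [PySem.List.pyGet?_of_nonneg _ (Int.natCast_nonneg 0), PySem.List.pyGet?_of_nonneg _ (Int.natCast_nonneg 0)]
      simp only [Int.toNat_natCast]
      exact List.getElem?_set_ne (by omega)
    have hrec : findWall (row.set m v) (((0:Nat):Int) - 1) = findWall row (((0:Nat):Int) - 1) := by
      rw [findWall_neg _ _ (by omega), findWall_neg _ _ (by omega)]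
    conv_lhs => rw [findWall]
    conv_rhs => rw [findWall]
    rw [hg, hrec]
  | succ n ih =>
    have hg : PySem.List.pyGet? (row.set m v) ((n+1:Nat):Int) = PySem.List.pyGet? row ((n+1:Nat):Int) := by
      rw [PySem.List.pyGet?_of_nonneg _ (Int.natCast_nonneg (n+1)), PySem.List.pyGet?_of_nonneg _ (Int.natCast_nonneg (n+1))]
      simp only [Int.toNat_natCast]
      exact List.getElem?_set_ne (by omega)
    have hcast : ((n+1 : Nat) : Int) - 1 = (n : Int) := by push_cast; ring
    have hrec : findWall (row.set m v) (((n+1:Nat):Int) - 1) = findWall row (((n+1:Nat):Int) - 1) := by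
      rw [hcast]; exact ih row (by omega)
    conv_lhs => rw [findWall]
    conv_rhs => rw [findWall]
    rw [hg, hrec]

theorem markStep_def (r : List String) (i : Int) :
    markStep r i = if PySem.List.pyGet? r i = some "0" then PySem.List.pySetD r i "#" else r := rfl

-- the marking fold commutes with an update at an index above all marked indices
theorem foldl_markStep_set_high (L : List Int) (r : List String) (m : Nat) (v : String)
    (hL : ∀ i ∈ L, 0 ≤ i ∧ i < (m : Int)) :
    L.foldl markStep (r.set m v) = (L.foldl markStep r).set m v := by
  induction L generalizing r with
  | nil => rfl
  | cons i L ihL =>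
    obtain ⟨hi0, him⟩ := hL i (List.mem_cons_self)
    have hne : i.toNat ≠ m := by omega
    have hstep : markStep (r.set m v) i = (markStep r i).set m v := by
      unfold markStep
      rw [PySem.List.pyGet?_of_nonneg _ hi0, PySem.List.pyGet?_of_nonneg _ hi0,
          List.getElem?_set_ne (show m ≠ i.toNat by omega)]
      by_cases hc : r[i.toNat]? = some "0"
      · rw [if_pos hc, if_pos hc, PySem.List.pySetD_of_nonneg _ _ hi0,
            PySem.List.pySetD_of_nonneg _ _ hi0]
        exact List.set_comm _ _ (show m ≠ i.toNat by omega)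
      · rw [if_neg hc, if_neg hc]
    simp only [List.foldl_cons, hstep]
    exact ihL _ (fun i hi => hL i (List.mem_cons_of_mem _ hi))

-- the marking fold does not change the element at an index above all marked indices
theorem foldl_markStep_get_high (L : List Int) (r : List String) (m : Nat)
    (hL : ∀ i ∈ L, 0 ≤ i ∧ i < (m : Int)) :
    (L.foldl markStep r)[m]? = r[m]? := by
  induction L generalizing r with
  | nil => rfl
  | cons i L ihL =>
    obtain ⟨hi0, him⟩ := hL i (List.mem_cons_self)
    have hne : i.toNat ≠ m := by omega
    have hstep : (markStep r i)[m]? = r[m]? := by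
      unfold markStep
      by_cases hc : PySem.List.pyGet? r i = some "0"
      · rw [if_pos hc, PySem.List.pySetD_of_nonneg _ _ hi0, List.getElem?_set_ne hne]
      · rw [if_neg hc]
    simp only [List.foldl_cons]
    rw [ihL _ (fun i hi => hL i (List.mem_cons_of_mem _ hi)), hstep]

-- central lemma: A's row loop = B's boundary scan + forward marking pass
theorem rowA_eq_markCells (k : Nat) : ∀ (row : List String), (k : Int) < row.length →
    rowA row (k : Int) = markCells row (findWall row (k : Int) + 1) ((k : Int) + 1) := by
  induction k with
  | zero =>
    intro row hk
    have h0 : 0 < row.length := by exact_mod_cast hk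
    have hr : PySem.List.pyGet? row ((0:Nat) : Int) = some row[0] := by
      rw [PySem.List.pyGet?_of_nonneg row (by norm_num)]
      simp [List.getElem?_eq_getElem h0]
    rw [rowA, findWall, dif_pos (Int.natCast_nonneg 0), dif_pos (Int.natCast_nonneg 0)]
    simp only [hr]
    by_cases h6 : row[0] = "6"
    · rw [if_pos h6, if_pos h6]
      unfold markCells
      rw [PySem.List.pyRange_one_eq_nil (by norm_num)]
      rfl
    · rw [if_neg h6, if_neg h6]
      rw [rowA, dif_neg (by norm_num : ¬ (0:Int) ≤ ((0:Nat):Int) - 1),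
          findWall, dif_neg (by norm_num : ¬ (0:Int) ≤ ((0:Nat):Int) - 1)]
      unfold markCells
      have : (-1 : Int) + 1 = 0 := by norm_num
      rw [this]
      have h01 : ((0:Nat):Int) + 1 = 0 + 1 := by norm_num
      rw [h01, PySem.List.pyRange_one_singleton]
      simp only [List.foldl_cons, List.foldl_nil]
      unfold markStep
      have hr0 : PySem.List.pyGet? row (0:Int) = some row[0] := by rw [← hr]; norm_num
      rw [hr0]
      by_cases h0c : row[0] = "0"
      · rw [if_pos (show some row[0] = some "0" by rw [h0c]), if_pos h0c]
        norm_num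
      · rw [if_neg (show ¬ some row[0] = some "0" by simp [h0c]), if_neg h0c]
  | succ n ih =>
    intro row hk
    have hlen : n + 1 < row.length := by exact_mod_cast hk
    have hr : PySem.List.pyGet? row ((n+1:Nat) : Int) = some row[n+1] := by
      rw [PySem.List.pyGet?_of_nonneg row (by positivity)]
      simp [List.getElem?_eq_getElem hlen]
    have hcast : ((n+1 : Nat) : Int) - 1 = (n : Int) := by push_cast; ring
    rw [rowA, findWall, dif_pos (Int.natCast_nonneg (n+1)), dif_pos (Int.natCast_nonneg (n+1))]
    simp only [hr]
    by_cases h6 : row[n+1] = "6"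
    · rw [if_pos h6, if_pos h6]
      unfold markCells
      rw [PySem.List.pyRange_one_eq_nil (by omega)]
      rfl
    · rw [if_neg h6, if_neg h6, hcast]
      obtain ⟨hb1, hb2⟩ := findWall_bounds n row
      set b := findWall row (n : Int) with hbdef
      have hsplit : PySem.List.pyRange (b+1) (((n+1:Nat):Int) + 1) 1
          = PySem.List.pyRange (b+1) ((n:Int)+1) 1 ++ [(n:Int)+1] := by
        have : ((n+1:Nat):Int) + 1 = ((n:Int)+1) + 1 := by push_cast; ring
        rw [this]
        exact PySem.List.pyRange_one_succ_right (by omega)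
      have hmemL : ∀ i ∈ PySem.List.pyRange (b+1) ((n:Int)+1) 1, 0 ≤ i ∧ i < ((n+1:Nat) : Int) := by
        intro i hi
        rw [PySem.List.mem_pyRange_one] at hi
        constructor <;> [omega; (push_cast; omega)]
      have hP : ((PySem.List.pyRange (b+1) ((n:Int)+1) 1).foldl markStep row)[n+1]? = some row[n+1] := by
        rw [foldl_markStep_get_high _ row (n+1) (by exact_mod_cast hmemL)]
        exact List.getElem?_eq_getElem hlen
      by_cases h0c : row[n+1] = "0"
      · rw [if_pos h0c]
        have hsetrow : PySem.List.pySetD row ((n+1 : Nat) : Int) "#" = row.set (n+1) "#" := by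
          rw [PySem.List.pySetD_of_nonneg row _ (by positivity)]; simp
        rw [hsetrow]
        have hfw : findWall (row.set (n+1) "#") (n : Int) = b := by
          rw [hbdef]; exact findWall_set_high n row (n+1) "#" (by omega)
        have hlen' : (n : Int) < (row.set (n+1) "#").length := by
          rw [List.length_set]; exact_mod_cast (by omega : n < row.length)
        rw [ih _ hlen']
        unfold markCells
        rw [hfw, hsplit, List.foldl_append]
        simp only [List.foldl_cons, List.foldl_nil]
        rw [foldl_markStep_set_high _ row (n+1) "#" (by exact_mod_cast hmemL)]
        rw [markStep_def, PySem.List.pyGet?_of_nonneg _ (by positivity)]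
        have hgetP : ((PySem.List.pyRange (b+1) ((n:Int)+1) 1).foldl markStep row)[((n:Int)+1).toNat]? = some "0" := by
          rw [show ((n:Int)+1).toNat = n + 1 by omega, hP, h0c]
        rw [if_pos hgetP, PySem.List.pySetD_of_nonneg _ _ (by positivity)]
        rw [show ((n:Int)+1).toNat = n + 1 by omega]
      · rw [if_neg h0c]
        rw [ih row (by exact_mod_cast (by omega : n < row.length))]
        unfold markCells
        rw [← hbdef, hsplit, List.foldl_append]
        simp only [List.foldl_cons, List.foldl_nil]
        rw [markStep_def, PySem.List.pyGet?_of_nonneg _ (by positivity)]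
        have hgetP : ((PySem.List.pyRange (b+1) ((n:Int)+1) 1).foldl markStep row)[((n:Int)+1).toNat]? = some row[n+1] := by
          rw [show ((n:Int)+1).toNat = n + 1 by omega, hP]
        rw [hgetP, if_neg (by simp [h0c])]

-- ===== VERDICT (by name: the statement is the Claim_ definition above) =====
theorem mark_left_spec : Claim_equal_mark_left := by
  intro board x y hdom hpre
  unfold Spec_mark_left
  by_cases hy : y < 0
  · unfold mark_left mark_left_alt
    rw [markAloop, dif_neg (by omega : ¬ (0:Int) ≤ y), if_pos hy]
  · rcases hpre with hpre | ⟨hx, hylen⟩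
    · omega
    obtain ⟨j, hidx, hj⟩ := pyIdx_of_inRange board.length x hx
    have hrow : board[j]? = some board[j] := List.getElem?_eq_getElem hj
    have hg2 : PySem.List.pyGet? board x = some board[j] :=
      (pyGet?_of_pyIdx board x j hidx).trans hrow
    have hylen' : y < (board[j].length : Int) := by
      rw [hg2] at hylen; simpa using hylen
    have hk : ((y.toNat : Nat) : Int) = y := Int.toNat_of_nonneg (by omega)
    unfold mark_left mark_left_alt
    rw [if_neg hy]
    simp only [hg2]
    rw [pySetD_of_pyIdx board x j _ hidx]
    rw [← hk]
    rw [markAloop_eq_set y.toNat board x j board[j] hidx hj hrow (by rw [hk]; exact hylen')]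
    rw [rowA_eq_markCells y.toNat board[j] (by rw [hk]; exact hylen')]
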